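-- pv_equiv track=rewrite | github.com/0xGuyG/PythonPT-OffSec | scanner.py | detect_services
-- ===== SOURCE A (Python) =====
-- def detect_services(host, ports_and_banners):
--     """
--     Detects services running on open ports based on port numbers and banners.
--     Known ports for specific services are checked first, followed by banner inspection.
--     Returns a list of tuples containing service names and port numbers.
--     """
--     services = []
--     for port, banner in ports_and_banners:
--         if port == 22 or "SSH" in banner:
--             services.append(("ssh", port))
--         elif port == 21 or "FTP" in banner:
--             services.append(("ftp", port))
--         elif port in [139, 445] or "SMB" in banner or "Microsoft-DS" in banner:
--             services.append(("smb", port))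
--         elif port == 3306 or "MySQL" in banner:
--             services.append(("mysql", port))
--         elif port == 3389 or "RDP" in banner:
--             services.append(("rdp", port))
--     return services
-- ===== SOURCE B (Python) =====
-- # Classify by minimum rule priority: port lookup + banner-substring priorities,
-- # then take the smallest matching priority instead of scanning rules in order.
-- PORT_PRIORITY = {22: 0, 21: 1, 139: 2, 445: 2, 3306: 3, 3389: 4}
-- BANNER_PRIORITY = [("SSH", 0), ("FTP", 1), ("SMB", 2), ("Microsoft-DS", 2),
--                    ("MySQL", 3), ("RDP", 4)]
-- NAMES = ["ssh", "ftp", "smb", "mysql", "rdp"]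
--
-- def detect_services(host, ports_and_banners):
--     services = []
--     for port, banner in ports_and_banners:
--         cands = [p for s, p in BANNER_PRIORITY if s in banner]
--         if port in PORT_PRIORITY:
--             cands.append(PORT_PRIORITY[port])
--         if cands:
--             services.append((NAMES[min(cands)], port))
--     return services
-- ===== Notes on version B (the rewrite author's own statement) =====
-- stated objective: alternative
-- what changed: Replaces the ordered if/elif cascade (first-match-wins) by a minimum-priority classification: each item collects the numeric priorities of all matching clues (a port-priority dict lookup plus banner-substring priorities) and is labelled by the name at the smallest priority.
import Mathlib
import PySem

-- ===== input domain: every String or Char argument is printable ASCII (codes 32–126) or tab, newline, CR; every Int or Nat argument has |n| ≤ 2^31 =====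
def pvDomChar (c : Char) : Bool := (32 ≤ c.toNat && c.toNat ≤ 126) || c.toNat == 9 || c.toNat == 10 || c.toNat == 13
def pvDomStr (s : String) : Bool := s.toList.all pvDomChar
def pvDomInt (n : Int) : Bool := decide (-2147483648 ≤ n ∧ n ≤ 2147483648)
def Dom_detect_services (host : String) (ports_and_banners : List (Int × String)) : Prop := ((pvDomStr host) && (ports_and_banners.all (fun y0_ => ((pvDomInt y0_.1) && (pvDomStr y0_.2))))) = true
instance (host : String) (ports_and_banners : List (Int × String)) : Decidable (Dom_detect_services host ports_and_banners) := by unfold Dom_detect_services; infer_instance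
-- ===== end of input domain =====

-- B replaces A's ordered if/elif cascade by a minimum-priority classification: collect the
-- priorities of all matching clues (port lookup + banner substrings) and take the smallest (alternative; same cost).

-- ===== PORT A =====
def detect_services (host : String) (ports_and_banners : List (Int × String)) : List (String × Int) :=
  ports_and_banners.foldl (fun services pb =>
    let port := pb.1
    let banner := pb.2
    if port == 22 || PySem.Str.isIn "SSH" banner then services ++ [("ssh", port)]
    else if port == 21 || PySem.Str.isIn "FTP" banner then services ++ [("ftp", port)]
    else if ([139, 445] : List Int).contains port || PySem.Str.isIn "SMB" banner || PySem.Str.isIn "Microsoft-DS" banner then services ++ [("smb", port)]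
    else if port == 3306 || PySem.Str.isIn "MySQL" banner then services ++ [("mysql", port)]
    else if port == 3389 || PySem.Str.isIn "RDP" banner then services ++ [("rdp", port)]
    else services) []

-- ===== PORT B =====
-- B: per item, gather the priorities of every matching clue and classify by the minimum.
-- PORT_PRIORITY dict as an association list (lookup = first match)
def pvPortPriority : List (Int × Nat) := [(22, 0), (21, 1), (139, 2), (445, 2), (3306, 3), (3389, 4)]

-- 'port in PORT_PRIORITY' / 'PORT_PRIORITY[port]' combined into one Option-valued lookup
def pvLookup (port : Int) : Option Nat := (pvPortPriority.find? (fun kv => kv.1 == port)).map (·.2)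

def pvBannerPriority : List (String × Nat) :=
  [("SSH", 0), ("FTP", 1), ("SMB", 2), ("Microsoft-DS", 2), ("MySQL", 3), ("RDP", 4)]

def pvNames : List String := ["ssh", "ftp", "smb", "mysql", "rdp"]

def detect_services_alt (host : String) (ports_and_banners : List (Int × String)) : List (String × Int) :=
  ports_and_banners.foldl (fun services pb =>
    let port := pb.1
    let banner := pb.2
    let cands := (pvBannerPriority.filter (fun sp => PySem.Str.isIn sp.1 banner)).map Prod.snd
    let cands := match pvLookup port with
      | some p => cands ++ [p]
      | none => cands
    match cands with
    | [] => services
    | c :: rest => services ++ [(pvNames.getD (rest.foldl min c) "", port)]) []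

-- ===== PRECONDITION & SPEC =====
def Spec_detect_services (host : String) (ports_and_banners : List (Int × String)) (out : List (String × Int)) : Prop := out = detect_services_alt host ports_and_banners
instance (host : String) (ports_and_banners : List (Int × String)) (out : List (String × Int)) : Decidable (Spec_detect_services host ports_and_banners out) := by unfold Spec_detect_services; infer_instance

-- ===== CLAIM (what is proved, stated in full; the proofs are below) =====
def Claim_equal_detect_services : Prop := ∀ (host : String) (ports_and_banners : List (Int × String)), Dom_detect_services host ports_and_banners → Spec_detect_services host ports_and_banners (detect_services host ports_and_banners)

-- ===== LEMMAS AND PROOFS =====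

lemma pvLookup_eq (port : Int) :
    pvLookup port = if port = 22 then some 0 else if port = 21 then some 1
      else if port = 139 then some 2 else if port = 445 then some 2
      else if port = 3306 then some 3 else if port = 3389 then some 4 else none := by
  simp only [pvLookup, pvPortPriority, List.find?]
  split_ifs with a b c d e f <;>
    first
      | simp [beq_eq_false_iff_ne.mpr (Ne.symm a), beq_eq_false_iff_ne.mpr (Ne.symm b),
              beq_eq_false_iff_ne.mpr (Ne.symm c), beq_eq_false_iff_ne.mpr (Ne.symm d),
              beq_eq_false_iff_ne.mpr (Ne.symm e), beq_eq_false_iff_ne.mpr (Ne.symm f)]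
      | simp_all [eq_comm]

set_option maxHeartbeats 4000000 in
set_option maxRecDepth 4000 in
lemma pv_step_eq (s : List (String × Int)) (port : Int) (banner : String) :
    (if port == 22 || PySem.Str.isIn "SSH" banner then s ++ [("ssh", port)]
     else if port == 21 || PySem.Str.isIn "FTP" banner then s ++ [("ftp", port)]
     else if ([139, 445] : List Int).contains port || PySem.Str.isIn "SMB" banner || PySem.Str.isIn "Microsoft-DS" banner then s ++ [("smb", port)]
     else if port == 3306 || PySem.Str.isIn "MySQL" banner then s ++ [("mysql", port)]
     else if port == 3389 || PySem.Str.isIn "RDP" banner then s ++ [("rdp", port)]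
     else s) =
    (let cands := (pvBannerPriority.filter (fun sp => PySem.Str.isIn sp.1 banner)).map Prod.snd
     let cands := match pvLookup port with
       | some p => cands ++ [p]
       | none => cands
     match cands with
     | [] => s
     | c :: rest => s ++ [(pvNames.getD (rest.foldl min c) "", port)]) := by
  rw [pvLookup_eq]
  simp only [pvBannerPriority, pvNames, PySem.Str.isIn_eq, List.filter]
  rcases eq_or_ne port 22 with rfl | n22
  · by_cases h0 : PySem.Chars.isIn ['S','S','H'] banner.toList <;>
    by_cases h1 : PySem.Chars.isIn ['F','T','P'] banner.toList <;>
    by_cases h2 : PySem.Chars.isIn ['S','M','B'] banner.toList <;>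
    by_cases h3 : PySem.Chars.isIn ['M','i','c','r','o','s','o','f','t','-','D','S'] banner.toList <;>
    by_cases h4 : PySem.Chars.isIn ['M','y','S','Q','L'] banner.toList <;>
    by_cases h5 : PySem.Chars.isIn ['R','D','P'] banner.toList <;>
    simp [h0, h1, h2, h3, h4, h5, List.foldl]
  rcases eq_or_ne port 21 with rfl | n21
  · by_cases h0 : PySem.Chars.isIn ['S','S','H'] banner.toList <;>
    by_cases h1 : PySem.Chars.isIn ['F','T','P'] banner.toList <;>
    by_cases h2 : PySem.Chars.isIn ['S','M','B'] banner.toList <;>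
    by_cases h3 : PySem.Chars.isIn ['M','i','c','r','o','s','o','f','t','-','D','S'] banner.toList <;>
    by_cases h4 : PySem.Chars.isIn ['M','y','S','Q','L'] banner.toList <;>
    by_cases h5 : PySem.Chars.isIn ['R','D','P'] banner.toList <;>
    simp [h0, h1, h2, h3, h4, h5, List.foldl]
  rcases eq_or_ne port 139 with rfl | n139
  · by_cases h0 : PySem.Chars.isIn ['S','S','H'] banner.toList <;>
    by_cases h1 : PySem.Chars.isIn ['F','T','P'] banner.toList <;>
    by_cases h2 : PySem.Chars.isIn ['S','M','B'] banner.toList <;>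
    by_cases h3 : PySem.Chars.isIn ['M','i','c','r','o','s','o','f','t','-','D','S'] banner.toList <;>
    by_cases h4 : PySem.Chars.isIn ['M','y','S','Q','L'] banner.toList <;>
    by_cases h5 : PySem.Chars.isIn ['R','D','P'] banner.toList <;>
    simp [h0, h1, h2, h3, h4, h5, List.foldl]
  rcases eq_or_ne port 445 with rfl | n445
  · by_cases h0 : PySem.Chars.isIn ['S','S','H'] banner.toList <;>
    by_cases h1 : PySem.Chars.isIn ['F','T','P'] banner.toList <;>
    by_cases h2 : PySem.Chars.isIn ['S','M','B'] banner.toList <;>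
    by_cases h3 : PySem.Chars.isIn ['M','i','c','r','o','s','o','f','t','-','D','S'] banner.toList <;>
    by_cases h4 : PySem.Chars.isIn ['M','y','S','Q','L'] banner.toList <;>
    by_cases h5 : PySem.Chars.isIn ['R','D','P'] banner.toList <;>
    simp [h0, h1, h2, h3, h4, h5, List.foldl]
  rcases eq_or_ne port 3306 with rfl | n3306
  · by_cases h0 : PySem.Chars.isIn ['S','S','H'] banner.toList <;>
    by_cases h1 : PySem.Chars.isIn ['F','T','P'] banner.toList <;>
    by_cases h2 : PySem.Chars.isIn ['S','M','B'] banner.toList <;>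
    by_cases h3 : PySem.Chars.isIn ['M','i','c','r','o','s','o','f','t','-','D','S'] banner.toList <;>
    by_cases h4 : PySem.Chars.isIn ['M','y','S','Q','L'] banner.toList <;>
    by_cases h5 : PySem.Chars.isIn ['R','D','P'] banner.toList <;>
    simp [h0, h1, h2, h3, h4, h5, List.foldl]
  rcases eq_or_ne port 3389 with rfl | n3389
  · by_cases h0 : PySem.Chars.isIn ['S','S','H'] banner.toList <;>
    by_cases h1 : PySem.Chars.isIn ['F','T','P'] banner.toList <;>
    by_cases h2 : PySem.Chars.isIn ['S','M','B'] banner.toList <;>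
    by_cases h3 : PySem.Chars.isIn ['M','i','c','r','o','s','o','f','t','-','D','S'] banner.toList <;>
    by_cases h4 : PySem.Chars.isIn ['M','y','S','Q','L'] banner.toList <;>
    by_cases h5 : PySem.Chars.isIn ['R','D','P'] banner.toList <;>
    simp [h0, h1, h2, h3, h4, h5, List.foldl]
  by_cases h0 : PySem.Chars.isIn ['S','S','H'] banner.toList <;>
    by_cases h1 : PySem.Chars.isIn ['F','T','P'] banner.toList <;>
    by_cases h2 : PySem.Chars.isIn ['S','M','B'] banner.toList <;>
    by_cases h3 : PySem.Chars.isIn ['M','i','c','r','o','s','o','f','t','-','D','S'] banner.toList <;>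
    by_cases h4 : PySem.Chars.isIn ['M','y','S','Q','L'] banner.toList <;>
    by_cases h5 : PySem.Chars.isIn ['R','D','P'] banner.toList <;>
    simp [h0, h1, h2, h3, h4, h5, n22, n21, n139, n445, n3306, n3389, List.foldl]

lemma pv_fold_eq (l : List (Int × String)) (s : List (String × Int)) :
    l.foldl (fun services pb =>
      let port := pb.1
      let banner := pb.2
      if port == 22 || PySem.Str.isIn "SSH" banner then services ++ [("ssh", port)]
      else if port == 21 || PySem.Str.isIn "FTP" banner then services ++ [("ftp", port)]
      else if ([139, 445] : List Int).contains port || PySem.Str.isIn "SMB" banner || PySem.Str.isIn "Microsoft-DS" banner then services ++ [("smb", port)]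
      else if port == 3306 || PySem.Str.isIn "MySQL" banner then services ++ [("mysql", port)]
      else if port == 3389 || PySem.Str.isIn "RDP" banner then services ++ [("rdp", port)]
      else services) s =
    l.foldl (fun services pb =>
      let port := pb.1
      let banner := pb.2
      let cands := (pvBannerPriority.filter (fun sp => PySem.Str.isIn sp.1 banner)).map Prod.snd
      let cands := match pvLookup port with
        | some p => cands ++ [p]
        | none => cands
      match cands with
      | [] => services
      | c :: rest => services ++ [(pvNames.getD (rest.foldl min c) "", port)]) s := by
  induction l generalizing s with
  | nil => rfl
  | cons hd tl ih => rw [List.foldl_cons, List.foldl_cons, pv_step_eq]; exact ih _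

-- ===== VERDICT (by name: the statement is the Claim_ definition above) =====
theorem detect_services_spec : Claim_equal_detect_services := by
  intro host pbs _
  show detect_services host pbs = detect_services_alt host pbs
  simp only [detect_services, detect_services_alt]
  exact pv_fold_eq pbs []
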